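-- pv_equiv track=rewrite | github.com/Kitsunetic/kitsu | kitsu/utils/vis_text.py | make_table
-- ===== SOURCE A (Python) =====
-- from typing import Dict, List
--
-- def make_table(df: Dict[str, List[str]]) -> str:
--     """Turn the given `df` (dataframe) into a table that is made up with only `-`, `|`, and ` `.
--     Args:
--         df (Dict[str, List[str]]):
--     """
--     max_lens = {k: max([len(str(k))] + [len(str(x)) for x in df[k]]) for k in df}
--     W = sum(list(max_lens.values())) + 3 * (len(max_lens) - 1)  # width
--
--     n_items = [len(df[k]) for k in df]
--     N = n_items[0]
--     assert all([n_item == N for n_item in n_items]), f"Every column should have same number of items but {n_items}"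
--
--     out = "-" * W + "\n"
--     out += " | ".join([("{:<%d}" % max_lens[k]).format(str(k)) for k in df]) + "\n"
--     out += "-" * W + "\n"
--     for i in range(N):
--         out += " | ".join([("{:<%d}" % max_lens[k]).format(str(df[k][i])) for k in df]) + "\n"
--     out += "-" * W + "\n"
--     return out[:-1]
-- ===== SOURCE B (Python) =====
-- def make_table(df):
--     """Turn the given `df` (dataframe) into a table that is made up with only `-`, `|`, and ` `."""
--     n_items = [len(df[k]) for k in df]
--     N = n_items[0]
--     assert all([n_item == N for n_item in n_items]), f"Every column should have same number of items but {n_items}"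
--     # column-major: pad every column (header cell on top) to its own uniform width...
--     blocks = []
--     for k in df:
--         cells = [str(k)] + [str(x) for x in df[k]]
--         w = max(map(len, cells))
--         blocks.append([c.ljust(w) for c in cells])
--     # ...then transpose the padded blocks into finished lines
--     body = [" | ".join(line) for line in zip(*blocks)]
--     sep = "-" * len(body[0])
--     return "\n".join([sep, body[0], sep] + body[1:] + [sep])
-- ===== Notes on version B (the rewrite author's own statement) =====
-- stated objective: alternative
-- what changed: B builds the table column-major: each column (header cell on top) is padded into a uniform-width vertical block, the padded blocks are transposed with zip(*blocks) into finished lines, and the separator length is read off the rendered header line, replacing A's width dict, explicit width sum and row-major per-cell %-format passes.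
import Mathlib
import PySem

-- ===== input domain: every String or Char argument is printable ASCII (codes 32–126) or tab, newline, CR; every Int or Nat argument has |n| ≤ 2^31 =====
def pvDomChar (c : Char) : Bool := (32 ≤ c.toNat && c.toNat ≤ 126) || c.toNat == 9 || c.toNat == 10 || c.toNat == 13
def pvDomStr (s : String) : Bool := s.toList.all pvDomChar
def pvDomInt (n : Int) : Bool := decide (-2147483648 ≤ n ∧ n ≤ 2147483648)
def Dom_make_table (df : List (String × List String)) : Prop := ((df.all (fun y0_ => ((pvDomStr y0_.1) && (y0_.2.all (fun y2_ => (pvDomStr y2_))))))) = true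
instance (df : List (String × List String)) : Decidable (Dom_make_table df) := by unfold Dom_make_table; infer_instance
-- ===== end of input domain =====

-- B builds the table column-major (pad each column into a uniform-width block, transpose the
-- blocks into lines, read the separator length off the rendered header) instead of A's dict of
-- widths and row-major formatting; the RETURN value is proved equal on non-empty, rectangular,
-- duplicate-free inputs (A raises IndexError / AssertionError on empty or ragged dicts).

-- ===== PORT A =====
-- "{:<w}".format(s): left-justify with spaces (no truncation); Nat subtraction clamps like Python
def pvPad (cs : List Char) (w : Nat) : List Char := cs ++ List.replicate (w - cs.length) ' '

-- dict lookup d[k] (first match; under Pre_ the key is always present, so the default is unreachable)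
def pvLookup (l : List (String × Nat)) (k : String) (d : Nat) : Nat :=
  ((l.find? (fun p => p.1 == k)).map (fun p => p.2)).getD d

def make_table (df : List (String × List String)) : String :=
  -- {k: max([len(str(k))] + [len(str(x)) for x in df[k]]) for k in df}; under Pre_ keys are
  -- distinct, so df[k] is the pair's own value
  let max_lens : List (String × Nat) :=
    df.map (fun p => (p.1, (p.2.map (fun x => x.toList.length)).foldl Nat.max p.1.toList.length))
  let W : Int := (max_lens.map (fun q => (q.2 : Int))).sum + 3 * ((max_lens.length : Int) - 1)
  -- N = n_items[0] (IndexError on empty dict — excluded by Pre_); the assert holds under Pre_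
  let N : Nat := (PySem.List.pyGet? (df.map (fun p => p.2.length)) 0).getD 0
  let sep : List Char := List.replicate W.toNat '-'
  let out1 : List Char := sep ++ ['\n']
  let out2 : List Char := out1 ++
    (PySem.Chars.join " | ".toList (df.map (fun p => pvPad p.1.toList (pvLookup max_lens p.1 0))) ++ ['\n'])
  let out3 : List Char := out2 ++ (sep ++ ['\n'])
  let out4 : List Char := (PySem.List.pyRange 0 (N : Int) 1).foldl (fun acc i => acc ++
    (PySem.Chars.join " | ".toList
      (df.map (fun p => pvPad ((PySem.List.pyGet? p.2 i).getD "").toList (pvLookup max_lens p.1 0))) ++ ['\n'])) out3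
  let out5 : List Char := out4 ++ (sep ++ ['\n'])
  String.mk (PySem.List.slice out5 none (some (-1)))   -- out[:-1]

-- ===== PORT B =====
-- zip(b0, b1, …) over the padded blocks: row j for j below the shortest block length
def pvZipStar (g : List (List (List Char))) : List (List (List Char)) :=
  match g with
  | [] => []
  | r :: rs =>
    (List.range (rs.foldl (fun m l => Nat.min m l.length) r.length)).map
      (fun j => g.map (fun row => row.getD j []))

def make_table_alt (df : List (String × List String)) : String :=
  -- n_items[0] with the assert, exactly as in Source B (IndexError on empty dict — excluded by Pre_)
  let _N : Nat := (PySem.List.pyGet? (df.map (fun p => p.2.length)) 0).getD 0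
  -- blocks: every column padded (header cell on top) to its own uniform width
  let blocks : List (List (List Char)) :=
    df.map (fun p =>
      let cells : List (List Char) := p.1.toList :: p.2.map String.toList
      -- max(map(len, cells)): cells is non-empty, so the fold from 0 is Python's max exactly
      let w : Nat := (cells.map List.length).foldl Nat.max 0
      cells.map (fun c => pvPad c w))
  let body : List (List Char) := (pvZipStar blocks).map (fun line => PySem.Chars.join " | ".toList line)
  -- len(body[0]): body is non-empty under Pre_ (the getD default is unreachable)
  let sep : List Char := List.replicate (body.headD []).length '-'
  String.mk (PySem.Chars.join ['\n'] ([sep, body.headD [], sep] ++ body.drop 1 ++ [sep]))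

-- ===== PRECONDITION & SPEC =====
-- Pre_ excludes exactly: the empty dict (A raises IndexError at n_items[0]) and ragged columns
-- (A's assert fails); it also excludes duplicate keys, which no Python dict can contain, so the
-- association list there corresponds to no actual input of A.
def Pre_make_table (df : List (String × List String)) : Prop :=
  df ≠ [] ∧ (df.map Prod.fst).Nodup ∧ ∀ p ∈ df, p.2.length = (df.headD ("", [])).2.length
instance (df : List (String × List String)) : Decidable (Pre_make_table df) := by
  unfold Pre_make_table; infer_instance
def pvWitness_make_table : (List (String × List String)) := [("a", ["x"]), ("bb", ["yy"])]

def Spec_make_table (df : List (String × List String)) (out : String) : Prop := out = make_table_alt df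
instance (df : List (String × List String)) (out : String) : Decidable (Spec_make_table df out) := by
  unfold Spec_make_table; infer_instance

-- ===== CLAIM (what is proved, stated in full; the proofs are below) =====
def Claim_equal_make_table : Prop := ∀ (df : List (String × List String)),
  Dom_make_table df → Pre_make_table df → Spec_make_table df (make_table df)

-- ===== LEMMAS AND PROOFS =====

-- A's per-column width (the body of A's dict comprehension)
def pvW (q : String × List String) : Nat :=
  List.foldl Nat.max q.1.toList.length (List.map (fun x => x.toList.length) q.2)

-- one padded column of B, with its width already identified as A's pvW
def pvBlockOf (q : String × List String) : List (List Char) :=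
  (q.1.toList :: q.2.map String.toList).map (fun c => pvPad c (pvW q))

-- B's per-column max over the cells is A's pvW
theorem pvMaxCells (q : String × List String) :
    (((q.1.toList :: q.2.map String.toList).map List.length).foldl Nat.max 0) = pvW q := by
  simp [pvW, List.map_map, Function.comp_def]

theorem pvLookup_width (df : List (String × List String))
    (hnd : (df.map Prod.fst).Nodup) (q : String × List String) (hq : q ∈ df) :
    pvLookup (df.map (fun p => (p.1, pvW p))) q.1 0 = pvW q := by
  induction df with
  | nil => simp at hq
  | cons p rest ih =>
    rcases List.mem_cons.mp hq with h | h
    · subst h; simp [pvLookup]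
    · have hp : p.1 ∉ rest.map Prod.fst := (List.nodup_cons.mp (by simpa using hnd)).1
      have hne : (p.1 == q.1) = false := by
        simp only [beq_eq_false_iff_ne]; intro e
        exact hp (e ▸ List.mem_map.mpr ⟨q, h, rfl⟩)
      have : pvLookup ((p :: rest).map (fun p => (p.1, pvW p))) q.1 0
          = pvLookup (rest.map (fun p => (p.1, pvW p))) q.1 0 := by
        simp [pvLookup, hne]
      rw [this]
      exact ih (List.nodup_cons.mp (by simpa using hnd)).2 h

theorem pvFoldlMin {a : Type} (l : List (List a)) (n : Nat)
    (h : ∀ x ∈ l, x.length = n) :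
    l.foldl (fun m x => Nat.min m x.length) n = n := by
  induction l with
  | nil => rfl
  | cons x xs ih =>
    simp only [List.foldl_cons, h x (by simp), Nat.min_self]
    exact ih (fun y hy => h y (by simp [hy]))

-- the starting value is below a foldl of Nat.max
theorem pvLeFoldlMax (l : List Nat) (a : Nat) : a ≤ l.foldl Nat.max a := by
  induction l generalizing a with
  | nil => exact le_refl a
  | cons x xs ih => exact le_trans (Nat.le_max_left a x) (ih (Nat.max a x))

-- a padded header cell has length exactly pvW
theorem pvPad_head_len (q : String × List String) :
    (pvPad q.1.toList (pvW q)).length = pvW q := by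
  have h := pvLeFoldlMax (List.map (fun x => x.toList.length) q.2) q.1.toList.length
  simp only [pvPad, List.length_append, List.length_replicate, pvW] at *
  omega

-- length of a non-empty join
theorem pvJoinLen (s : List Char) (ls : List (List Char)) (h : ls ≠ []) :
    (PySem.Chars.join s ls).length = (ls.map List.length).sum + s.length * (ls.length - 1) := by
  induction ls with
  | nil => exact absurd rfl h
  | cons a tl ih =>
    cases tl with
    | nil => simp [PySem.Chars.join_singleton]
    | cons b rest =>
      rw [PySem.Chars.join_cons_cons, List.length_append, List.length_append, ih (by simp)]
      simp only [List.map_cons, List.sum_cons, List.length_cons, Nat.add_sub_cancel]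
      ring

-- B's transpose of the padded blocks, one row per j in range (N+1)
theorem pvZipBlocks (p : String × List String) (rest : List (String × List String))
    (hlen : ∀ q ∈ (p :: rest), q.2.length = p.2.length) :
    pvZipStar ((p :: rest).map pvBlockOf)
      = (List.range (p.2.length + 1)).map
          (fun j => (p :: rest).map (fun q => (pvBlockOf q).getD j [])) := by
  have hblen : ∀ q ∈ (p :: rest), (pvBlockOf q).length = p.2.length + 1 := by
    intro q hq; simp [pvBlockOf, hlen q hq]
  rw [List.map_cons]
  simp only [pvZipStar]
  have hmin : (rest.map pvBlockOf).foldl (fun m l => Nat.min m l.length) (pvBlockOf p).length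
      = p.2.length + 1 := by
    rw [hblen p (by simp)]
    exact pvFoldlMin _ _ (by
      intro x hx; rcases List.mem_map.mp hx with ⟨q, hq, rfl⟩
      exact hblen q (by simp [hq]))
  rw [hmin]
  apply List.map_congr_left
  intro j _
  simp [List.map_map, Function.comp_def]

-- a data cell of a padded block is A's padded cell
theorem pvBlockOf_getD_succ (q : String × List String) (i : Nat) (hi : i < q.2.length) :
    (pvBlockOf q).getD (i + 1) [] =
      pvPad ((PySem.List.pyGet? q.2 (i : Int)).getD "").toList (pvW q) := by
  have h1 : (PySem.List.pyGet? q.2 (i : Int)).getD "" = q.2[i] := by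
    simp [PySem.List.pyGet?_natCast, List.getElem?_eq_getElem hi]
  have h2 : (pvBlockOf q).getD (i + 1) []
      = ((q.2.map String.toList).map (fun c => pvPad c (pvW q))).getD i [] := rfl
  rw [h1, h2, List.getD_eq_getElem _ _ (by simpa using hi)]
  simp

-- dropping the final newline from A's "every line followed by newline" shape gives B's join
theorem pvJoinFlat (c : Char) (ls : List (List Char)) (h : ls ≠ []) :
    ((ls.map (fun l => l ++ [c])).flatten).dropLast = PySem.Chars.join [c] ls := by
  induction ls with
  | nil => exact absurd rfl h
  | cons l tl ih =>
    cases tl with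
    | nil => simp [PySem.Chars.join_singleton]
    | cons l2 rest =>
      rw [PySem.Chars.join_cons_cons]
      simp only [List.map_cons, List.flatten_cons] at ih ⊢
      have hne2 : l2 ++ [c] ++ (List.map (fun l => l ++ [c]) rest).flatten ≠ [] := by simp
      rw [List.dropLast_append_of_ne_nil hne2, ih (by simp)]

-- ===== VERDICT (by name: the statement is the Claim_ definition above) =====
theorem make_table_spec : Claim_equal_make_table := by
  intro df _hdom hpre
  obtain ⟨hne, hnd, hlen⟩ := hpre
  cases df with
  | nil => exact absurd rfl hne
  | cons p rest =>
    have hlen' : ∀ q ∈ (p :: rest), q.2.length = p.2.length := by simpa using hlen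
    unfold Spec_make_table
    simp only [make_table, make_table_alt]
    have hN : (PySem.List.pyGet? ((p :: rest).map (fun p => p.2.length)) 0).getD 0
        = p.2.length := by simp [PySem.List.pyGet?, PySem.List.pyIdx?]
    rw [hN]
    -- A: name the widths, turn the row loop into a flatMap over range, resolve the lookups
    have hml : ((p :: rest).map (fun p =>
        (p.1, List.foldl Nat.max p.1.toList.length (List.map (fun x => x.toList.length) p.2))))
        = (p :: rest).map (fun q => (q.1, pvW q)) := rfl
    rw [hml, PySem.List.foldl_append_eq_flatMap, PySem.List.pyRange_zero_natCast]
    have hhead : List.map (fun q =>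
        pvPad q.1.toList (pvLookup ((p :: rest).map (fun q => (q.1, pvW q))) q.1 0)) (p :: rest)
        = List.map (fun q => pvPad q.1.toList (pvW q)) (p :: rest) :=
      List.map_congr_left (fun q hq => by rw [pvLookup_width _ hnd q hq])
    have hrow : ∀ i : Int, List.map (fun q =>
        pvPad ((PySem.List.pyGet? q.2 i).getD "").toList
          (pvLookup ((p :: rest).map (fun q => (q.1, pvW q))) q.1 0)) (p :: rest)
        = List.map (fun q =>
        pvPad ((PySem.List.pyGet? q.2 i).getD "").toList (pvW q)) (p :: rest) :=
      fun i => List.map_congr_left (fun q hq => by rw [pvLookup_width _ hnd q hq])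
    simp only [hhead, hrow]
    -- B: identify the blocks, transpose them, split off the header row
    have hblocks : (p :: rest).map (fun q =>
        (q.1.toList :: q.2.map String.toList).map (fun c =>
          pvPad c (((q.1.toList :: q.2.map String.toList).map List.length).foldl Nat.max 0)))
        = (p :: rest).map pvBlockOf :=
      List.map_congr_left (fun q _ => by rw [pvMaxCells]; rfl)
    rw [hblocks, pvZipBlocks p rest hlen', List.range_succ_eq_map]
    -- the transposed-and-joined body is A's header line followed by A's data lines
    have hbody : List.map (fun line => PySem.Chars.join " | ".toList line)
        (List.map (fun j => List.map (fun q => (pvBlockOf q).getD j []) (p :: rest))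
          (0 :: List.map Nat.succ (List.range p.2.length)))
        = PySem.Chars.join " | ".toList
            (List.map (fun q => pvPad q.1.toList (pvW q)) (p :: rest))
          :: List.map (fun (i : Nat) => PySem.Chars.join " | ".toList
              (List.map (fun q =>
                pvPad ((PySem.List.pyGet? q.2 (i : Int)).getD "").toList (pvW q)) (p :: rest)))
              (List.range p.2.length) := by
      rw [List.map_map, List.map_cons, List.map_map]
      congr 1
      apply List.map_congr_left
      intro i hi
      simp only [Function.comp_apply]
      congr 1
      exact List.map_congr_left (fun q hq =>
        pvBlockOf_getD_succ q i (by rw [hlen' q hq]; exact List.mem_range.mp hi))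
    rw [hbody]
    simp only [List.headD_cons, List.drop_succ_cons, List.drop_zero]
    -- B's separator (length of the rendered header) is A's separator (the width sum)
    have hsep : List.replicate ((PySem.Chars.join " | ".toList
          (List.map (fun q => pvPad q.1.toList (pvW q)) (p :: rest))).length) '-'
        = List.replicate (((List.map (fun q => (q.2 : Int))
              (List.map (fun q => (q.1, pvW q)) (p :: rest))).sum
            + 3 * (((List.map (fun q => (q.1, pvW q)) (p :: rest)).length : Int) - 1)).toNat) '-' := by
      congr 1
      rw [pvJoinLen _ _ (by simp), List.map_map]
      have h1 : List.map (List.length ∘ fun q => pvPad q.1.toList (pvW q)) (p :: rest)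
          = List.map pvW (p :: rest) :=
        List.map_congr_left (fun q _ => pvPad_head_len q)
      rw [h1, List.map_map]
      have h2 : (List.map ((fun q => ((q.2 : Nat) : Int)) ∘ (fun q => (q.1, pvW q))) (p :: rest)).sum
          = ((List.map pvW (p :: rest)).sum : Int) := by
        simp [Nat.cast_list_sum, List.map_map, Function.comp_def]
      rw [h2]
      have h3 : " | ".toList.length = 3 := rfl
      rw [h3]
      simp only [List.length_map, List.length_cons]
      omega
    rw [hsep]
    -- both sides are now the same lines; compare through dropLast-of-flatten
    rw [PySem.List.slice_to_neg_one, ← pvJoinFlat '\n' _ (by simp)]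
    congr 1
    simp [List.flatMap_def, List.map_map, Function.comp_def, List.append_assoc]
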